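-- pv_equiv track=rewrite | github.com/rougecoin-project/gltch_agent | agent/gamification/ranks.py | get_rank_title
-- ===== SOURCE A (Python) =====
-- from typing import Dict
--
-- RANKS: Dict[int, str] = {
--     1: "Script Kiddie",
--     5: "Console Cowboy",
--     10: "Cyberdeck Operator",
--     20: "Netrunner",
--     35: "System Admin",
--     50: "Construct",
--     100: "Glitch God"
-- }
--
-- def get_rank_title(level: int) -> str:
--     """Get the rank title for a given level."""
--     current_rank = "Unknown"
--     for lvl, title in sorted(RANKS.items()):
--         if level >= lvl:
--             current_rank = title
--         else:
--             break
--     return current_rank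
-- ===== SOURCE B (Python) =====
-- from typing import Dict
--
-- RANKS: Dict[int, str] = {
--     1: "Script Kiddie",
--     5: "Console Cowboy",
--     10: "Cyberdeck Operator",
--     20: "Netrunner",
--     35: "System Admin",
--     50: "Construct",
--     100: "Glitch God"
-- }
--
-- def get_rank_title(level: int) -> str:
--     """Get the rank title for a given level."""
--     candidates = [(lvl, title) for lvl, title in RANKS.items() if lvl <= level]
--     if not candidates:
--         return "Unknown"
--     return max(candidates, key=lambda kv: kv[0])[1]
-- ===== Notes on version B (the rewrite author's own statement) =====
-- stated objective: simpler
-- what changed: Replaces the sorted-ascending scan with early break by a filter of thresholds <= level followed by max on the threshold key (no sort, no break logic).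
import Mathlib
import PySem

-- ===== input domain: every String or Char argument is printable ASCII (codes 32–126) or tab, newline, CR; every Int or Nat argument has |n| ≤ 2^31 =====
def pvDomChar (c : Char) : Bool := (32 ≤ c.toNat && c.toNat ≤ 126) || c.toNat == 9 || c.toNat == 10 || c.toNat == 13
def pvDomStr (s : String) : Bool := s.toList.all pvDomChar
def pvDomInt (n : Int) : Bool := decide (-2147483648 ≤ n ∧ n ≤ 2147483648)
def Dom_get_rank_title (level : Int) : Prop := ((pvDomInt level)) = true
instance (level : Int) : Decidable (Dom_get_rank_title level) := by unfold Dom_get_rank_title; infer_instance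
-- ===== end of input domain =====

-- B replaces A's sorted-ascending scan with early break by filter(threshold <= level) then max on the threshold key; objective: simpler.
-- ===== PORT A =====
-- the module constant RANKS as an association list in insertion order
def pvRanks : List (Int × String) :=
  [(1, "Script Kiddie"), (5, "Console Cowboy"), (10, "Cyberdeck Operator"),
   (20, "Netrunner"), (35, "System Admin"), (50, "Construct"), (100, "Glitch God")]

-- the for-loop of A: carries current_rank, 'break' = return current_rank
def pvLoopA (level : Int) : List (Int × String) → String → String
  | [], cur => cur
  | (lvl, title) :: rest, cur =>
      if level ≥ lvl then pvLoopA level rest title else cur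

-- sorted(RANKS.items()): tuple sort; keys are distinct so sorted2 on (key, title) is exact
def get_rank_title (level : Int) : String :=
  pvLoopA level (PySem.List.sorted2 pvRanks (fun kv => kv.1) (fun kv => kv.2)) "Unknown"

-- ===== PORT B =====
def get_rank_title_alt (level : Int) : String :=
  let candidates := pvRanks.filter (fun kv => kv.1 ≤ level)
  if candidates = [] then "Unknown"
  else match PySem.List.max? candidates (fun kv => kv.1) with
       | some kv => kv.2
       | none => "Unknown"  -- unreachable: candidates ≠ []

-- ===== PRECONDITION & SPEC =====
def Spec_get_rank_title (level : Int) (out : String) : Prop := out = get_rank_title_alt level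
instance (level : Int) (out : String) : Decidable (Spec_get_rank_title level out) := by unfold Spec_get_rank_title; infer_instance

-- ===== CLAIM (what is proved, stated in full; the proofs are below) =====
def Claim_equal_get_rank_title : Prop := ∀ (level : Int), Dom_get_rank_title level → Spec_get_rank_title level (get_rank_title level)

-- ===== LEMMAS AND PROOFS =====
-- pvRanks is already key-sorted, so Python's sorted leaves it unchanged (computed by the kernel)
theorem pvSorted_eq : PySem.List.sorted2 pvRanks (fun kv => kv.1) (fun kv => kv.2) = pvRanks := by
  decide

-- ===== VERDICT (by name: the statement is the Claim_ definition above) =====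
theorem get_rank_title_spec : Claim_equal_get_rank_title := by
  intro level _
  unfold Spec_get_rank_title get_rank_title get_rank_title_alt
  rw [pvSorted_eq]
  by_cases h1 : (1:Int) ≤ level <;> by_cases h5 : (5:Int) ≤ level <;>
    by_cases h10 : (10:Int) ≤ level <;> by_cases h20 : (20:Int) ≤ level <;>
    by_cases h35 : (35:Int) ≤ level <;> by_cases h50 : (50:Int) ≤ level <;>
    by_cases h100 : (100:Int) ≤ level <;>
    first
      | (exfalso; omega)
      | simp [pvRanks, pvLoopA, PySem.List.max?, List.filter, List.foldl,
              h1, h5, h10, h20, h35, h50, h100, ge_iff_le]
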